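-- pv_equiv track=rewrite | github.com/Uzumaki-Charo/Archived_Codes | printtower.py | tower
-- ===== SOURCE A (Python) =====
-- def tower(n):
-- 	a=[""]*n
-- 	for j in range(0,n):
-- 		for i in range(0,2*n-1):
-- 			if n-1-j<=i<n+j:
-- 				a[j]+="".join("*")
-- 			else:
-- 				a[j]+="".join(" ")
-- 	return a
--
-- 	return [("*" * (i*2-1)).center(n*2-1) for i in range(1, n+1)]
-- ===== SOURCE B (Python) =====
-- def tower(n):
--     width = 2 * n - 1
--     return [("*" * (2 * i - 1)).center(width) for i in range(1, n + 1)]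
-- ===== Notes on version B (the rewrite author's own statement) =====
-- stated objective: faster
-- what changed: Replaces the per-cell inner loop with its range-membership branch and character-by-character string concatenation by a closed-form star count (2*i-1) plus one str.center call per row, built in a single comprehension.
import Mathlib
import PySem

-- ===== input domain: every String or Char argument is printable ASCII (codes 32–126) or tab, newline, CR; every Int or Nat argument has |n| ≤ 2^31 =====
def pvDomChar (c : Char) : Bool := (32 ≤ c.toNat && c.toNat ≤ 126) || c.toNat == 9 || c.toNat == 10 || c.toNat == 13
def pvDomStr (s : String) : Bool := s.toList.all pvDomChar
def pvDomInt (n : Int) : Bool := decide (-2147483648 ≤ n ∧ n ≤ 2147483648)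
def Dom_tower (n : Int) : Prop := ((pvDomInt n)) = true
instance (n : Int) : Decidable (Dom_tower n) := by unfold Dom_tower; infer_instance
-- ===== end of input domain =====

-- B builds each row from the closed-form star count 2*i-1 plus a str.center call, dropping
-- A's per-cell loop with its range test and char-by-char concatenation (measured faster).


-- ===== PORT A =====
-- a = [""]*n; for j in range(0,n): for i in range(0,2*n-1): a[j] += "*" or " "
def tower (n : Int) : List String :=
  let a : List String := List.replicate n.toNat ""
  (PySem.List.pyRange 0 n 1).foldl
    (fun a j =>
      a.set j.toNat (String.ofList
        ((PySem.List.pyRange 0 (2*n-1) 1).foldl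
          (fun s i => if n-1-j ≤ i ∧ i < n+j then s ++ ['*'] else s ++ [' '])
          (PySem.List.pyGetD a j "").toList)))
    a

-- ===== PORT B =====
-- exact port of CPython str.center(w) with space fill:
-- left pad = marg//2 + (marg & w & 1), written as marg/2 + (marg%2)*(w%2)
def pyCenter (cs : List Char) (w : Int) : List Char :=
  if w ≤ (cs.length : Int) then cs
  else
    let marg := (w - cs.length).toNat
    let left := marg / 2 + (marg % 2) * (w.toNat % 2)
    List.replicate left ' ' ++ cs ++ List.replicate (marg - left) ' '

-- [("*" * (2*i-1)).center(2*n-1) for i in range(1, n+1)]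
def tower_alt (n : Int) : List String :=
  let width := 2*n - 1
  (PySem.List.pyRange 1 (n+1) 1).map
    (fun i => String.ofList (pyCenter (List.replicate (2*i-1).toNat '*') width))

-- ===== PRECONDITION & SPEC =====
def Spec_tower (n : Int) (out : List String) : Prop := out = tower_alt n
instance (n : Int) (out : List String) : Decidable (Spec_tower n out) := by unfold Spec_tower; infer_instance

-- ===== CLAIM (what is proved, stated in full; the proofs are below) =====
def Claim_equal_tower : Prop := ∀ (n : Int), Dom_tower n → Spec_tower n (tower n)

-- ===== LEMMAS AND PROOFS =====

-- the characters of A's row j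
def rowChars (n j : Int) : List Char :=
  (PySem.List.pyRange 0 (2*n-1) 1).map (fun i => if n-1-j ≤ i ∧ i < n+j then '*' else ' ')

-- inner loop of A appends exactly the mapped characters
lemma inner_fold (n j : Int) (init : List Char) :
    (PySem.List.pyRange 0 (2*n-1) 1).foldl
      (fun s i => if n-1-j ≤ i ∧ i < n+j then s ++ ['*'] else s ++ [' ']) init
    = init ++ rowChars n j := by
  have key : ∀ (l : List Int) (init : List Char),
      l.foldl (fun s i => if n-1-j ≤ i ∧ i < n+j then s ++ ['*'] else s ++ [' ']) init
      = init ++ l.map (fun i => if n-1-j ≤ i ∧ i < n+j then '*' else ' ') := by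
    intro l
    induction l with
    | nil => simp
    | cons x xs ih =>
      intro init
      simp only [List.foldl_cons, List.map_cons]
      rw [ih]
      by_cases h : n-1-j ≤ x ∧ x < n+j
      · rw [if_pos h, if_pos h]
        simp
      · rw [if_neg h, if_neg h]
        simp
  exact key _ init

-- constant segment of rowChars becomes replicate
lemma map_const_pyRange (a b : Int) (f : Int → Char) (c : Char)
    (h : ∀ x, a ≤ x → x < b → f x = c) :
    (PySem.List.pyRange a b 1).map f = List.replicate (b-a).toNat c := by
  have hc : (PySem.List.pyRange a b 1).map f
      = (PySem.List.pyRange a b 1).map (fun _ => c) :=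
    List.map_congr_left (fun x hx => by
      rw [PySem.List.mem_pyRange_one] at hx
      exact h x hx.1 hx.2)
  rw [hc]
  simp [PySem.List.length_pyRange_one]

lemma rowChars_eq (n : Int) (j : Nat) (hj : (j : Int) < n) :
    rowChars n j = List.replicate (n-1-j).toNat ' '
      ++ List.replicate (2*j+1) '*' ++ List.replicate (n-1-j).toNat ' ' := by
  unfold rowChars
  rw [PySem.List.pyRange_one_append 0 (n-1-j) (2*n-1) (by omega) (by omega),
      PySem.List.pyRange_one_append (n-1-j) (n+j) (2*n-1) (by omega) (by omega)]
  simp only [List.map_append]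
  rw [map_const_pyRange 0 (n-1-j) _ ' ' (fun x h1 h2 => by
        rw [if_neg (by omega)]),
      map_const_pyRange (n-1-j) (n+j) _ '*' (fun x h1 h2 => by
        rw [if_pos (by omega)]),
      map_const_pyRange (n+j) (2*n-1) _ ' ' (fun x h1 h2 => by
        rw [if_neg (by omega)])]
  have h1 : (n - 1 - (j:Int) - 0).toNat = (n-1-(j:Int)).toNat := by omega
  have h2 : (n + (j:Int) - (n-1-j)).toNat = 2*j+1 := by omega
  have h3 : (2*n - 1 - (n+(j:Int))).toNat = (n-1-(j:Int)).toNat := by omega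
  rw [h1, h2, h3, ← List.append_assoc]

-- padding congruence used to close the center computation
lemma pad_congr (l1 l2 r1 r2 : Nat) (cs : List Char)
    (hl : l1 = l2) (hr : r1 = r2) :
    List.replicate l1 ' ' ++ cs ++ List.replicate r1 ' '
    = List.replicate l2 ' ' ++ cs ++ List.replicate r2 ' ' := by
  rw [hl, hr]

-- A's outer loop: fold of set over a state whose entries from m on are ""
lemma outer_fold (n : Int) :
    ∀ (k : Nat) (m : Int) (a : List String), 0 ≤ m → m + k = n →
    a.length = n.toNat →
    (∀ i : Nat, m ≤ (i : Int) → PySem.List.pyGetD a (i : Int) "" = "") →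
    (PySem.List.pyRange m n 1).foldl
      (fun a j =>
        a.set j.toNat (String.ofList
          ((PySem.List.pyRange 0 (2*n-1) 1).foldl
            (fun s i => if n-1-j ≤ i ∧ i < n+j then s ++ ['*'] else s ++ [' '])
            (PySem.List.pyGetD a j "").toList))) a
    = (List.range n.toNat).map
        (fun (i : Nat) => if m ≤ (i : Int) then String.ofList (rowChars n (i : Int))
                  else PySem.List.pyGetD a (i : Int) "") := by
  intro k
  induction k with
  | zero =>
    intro m a hm hk ha hblank
    have hnm : n ≤ m := by omega
    rw [PySem.List.pyRange_one_eq_nil hnm]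
    simp only [List.foldl_nil]
    apply List.ext_getElem (by simp [ha])
    intro i h1 h2
    have hi : (i:Int) < n := by
      have : i < n.toNat := ha ▸ h1
      omega
    simp only [List.getElem_map, List.getElem_range]
    rw [if_neg (by omega), PySem.List.pyGetD_natCast]
    rw [List.getD_eq_getElem a "" h1]
  | succ k ih =>
    intro m a hm hk ha hblank
    have hmn : m < n := by omega
    rw [PySem.List.pyRange_one_cons hmn]
    simp only [List.foldl_cons]
    have hread : PySem.List.pyGetD a m "" = "" := by
      have := hblank m.toNat (by omega)
      rwa [Int.toNat_of_nonneg hm] at this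
    rw [hread, inner_fold]
    rw [ih (m+1) (a.set m.toNat (String.ofList ("".toList ++ rowChars n m)))
        (by omega) (by omega) (by simp [ha])
        (fun i hi => by
          have hne : m.toNat ≠ i := by omega
          have hb := hblank i (by omega)
          rw [PySem.List.pyGetD_natCast] at hb ⊢
          simpa [List.getD, List.getElem?_set_ne hne] using hb)]
    apply List.ext_getElem (by simp)
    intro i h1 h2
    simp only [List.getElem_map, List.getElem_range]
    by_cases hcase : (i:Int) = m
    · have him : i = m.toNat := by omega
      have hlen : m.toNat < a.length := by
        have h2b : i < n.toNat := by simpa using h2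
        omega
      rw [if_neg (by omega), if_pos (by omega), him, PySem.List.pyGetD_natCast]
      rw [List.getD_eq_getElem _ "" (by simpa using hlen), List.getElem_set_self (by simpa using hlen)]
      rw [Int.toNat_of_nonneg hm]
      simp
    · have heq : (m + 1 ≤ (i:Int)) ↔ (m ≤ (i:Int)) := by omega
      rw [if_congr heq rfl rfl]
      by_cases hle : m ≤ (i:Int)
      · rw [if_pos hle, if_pos hle]
      · rw [if_neg hle, if_neg hle]
        rw [PySem.List.pyGetD_natCast, PySem.List.pyGetD_natCast]
        have hne : m.toNat ≠ i := by omega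
        simp [List.getD, List.getElem?_set_ne hne]

-- B's row equals A's rowChars
lemma center_eq_rowChars (n : Int) (j : Nat) (hj : (j : Int) < n) :
    pyCenter (List.replicate (2*((j:Int)+1)-1).toNat '*') (2*n-1) = rowChars n j := by
  rw [rowChars_eq n j hj]
  have hstars : (2*((j:Int)+1)-1).toNat = 2*j+1 := by omega
  rw [hstars]
  simp only [pyCenter, List.length_replicate]
  split_ifs with hle
  · have hz : (n-1-(j:Int)).toNat = 0 := by omega
    rw [hz]
    simp
  · have hjn : (j:Int) + 1 < n := by
      push_cast at hle
      omega
    have hmarg : ((2*n-1 : Int) - ((2*j+1 : Nat) : Int)).toNat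
        = 2 * (n-1-(j:Int)).toNat := by
      push_cast
      omega
    apply pad_congr
    · rw [hmarg, Nat.mul_mod_right 2, Nat.zero_mul]
      omega
    · rw [hmarg, Nat.mul_mod_right 2, Nat.zero_mul]
      omega

-- ===== VERDICT (by name: the statement is the Claim_ definition above) =====
theorem tower_spec : Claim_equal_tower := by
  unfold Claim_equal_tower
  intro n _
  unfold Spec_tower tower tower_alt
  dsimp only
  by_cases hn : 0 ≤ n
  · rw [outer_fold n n.toNat 0 (List.replicate n.toNat "") le_rfl (by omega)
        (by simp)
        (fun i _ => by
          rw [PySem.List.pyGetD_natCast]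
          by_cases h : i < n.toNat <;>
            simp [List.getD, h])]
    rw [PySem.List.pyRange_one 1 (n+1)]
    have hlen : ((n + 1 - 1).toNat) = n.toNat := by omega
    rw [hlen, List.map_map]
    apply List.ext_getElem (by simp)
    intro i h1 h2
    simp only [List.getElem_map, List.getElem_range, Function.comp]
    rw [if_pos (Int.natCast_nonneg i)]
    have hi : (i:Int) < n := by
      simp only [List.length_map, List.length_range] at h1
      omega
    have harg : (1 : Int) + (i:Nat) = ((i:Nat):Int) + 1 := by ring
    rw [harg]
    exact congrArg String.ofList (center_eq_rowChars n i hi).symm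
  · have h0 : n.toNat = 0 := by omega
    rw [PySem.List.pyRange_one_eq_nil (by omega : n ≤ 0),
        PySem.List.pyRange_one_eq_nil (by omega : n + 1 ≤ 1), h0]
    simp
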